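-- pv_equiv track=rewrite | github.com/cesarrm23/Bifsa | limpiar_Datos.py | extraer_descripcion
-- ===== SOURCE A (Python) =====
-- def extraer_descripcion(texto):
--     texto_dividido = texto.split(' ')
--     descripcion = []
--     for t in texto_dividido:
--         if not any(c.isdigit() for c in t):
--             descripcion.append(t)
--         else:
--             break
--     return ' '.join(descripcion)
-- ===== SOURCE B (Python) =====
-- def extraer_descripcion(texto):
--     # One pass over the characters: remember the last space seen; at the first
--     # digit, everything before that space is the description.
--     corte = -1
--     for i, c in enumerate(texto):
--         if c == ' ':
--             corte = i
--         elif c.isdigit():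
--             return texto[:corte] if corte != -1 else ''
--     return texto
-- ===== Notes on version B (the rewrite author's own statement) =====
-- stated objective: alternative
-- what changed: Replaces split-into-words plus a word loop and join with a single character scan that tracks the last space index and returns one slice at the first digit, building no word list; it trades C-level split/join builtins for an explicit one-pass scan.
import Mathlib
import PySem

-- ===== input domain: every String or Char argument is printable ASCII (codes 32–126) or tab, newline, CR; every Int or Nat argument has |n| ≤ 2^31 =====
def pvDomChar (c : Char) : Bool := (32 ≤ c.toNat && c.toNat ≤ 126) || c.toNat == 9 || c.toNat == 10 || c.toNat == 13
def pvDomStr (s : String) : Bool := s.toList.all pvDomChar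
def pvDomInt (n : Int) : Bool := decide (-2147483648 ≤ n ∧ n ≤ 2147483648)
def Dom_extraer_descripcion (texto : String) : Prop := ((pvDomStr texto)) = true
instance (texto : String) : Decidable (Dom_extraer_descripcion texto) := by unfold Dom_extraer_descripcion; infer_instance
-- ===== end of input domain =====

-- B replaces A's split-into-words + word loop by a single character scan with one slice; same return value on every input.

-- ===== PORT A =====
-- the for-loop with break: append words while no digit, stop at the first digit-bearing word
def pvALoop (ws : List (List Char)) (descripcion : List (List Char)) : List (List Char) :=
  match ws with
  | [] => descripcion
  | t :: rest =>
    if (t.any PySem.Chars.isdigit) = false then pvALoop rest (descripcion ++ [t])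
    else descripcion

def extraer_descripcion (texto : String) : String :=
  let texto_dividido := PySem.Chars.splitOn texto.toList [' ']
  String.ofList (PySem.Chars.join [' '] (pvALoop texto_dividido []))

-- ===== PORT B =====
-- the for-loop over enumerate(texto): corte tracks the last space index; at the first digit return texto[:corte] (or '')
def pvBLoop (texto : List Char) (pending : List Char) (i : Nat) (corte : Int) : List Char :=
  match pending with
  | [] => texto
  | c :: rest =>
    if c = ' ' then pvBLoop texto rest (i + 1) (i : Int)
    else if PySem.Chars.isdigit c then
      (if corte ≠ -1 then PySem.Chars.slice texto none (some corte) else [])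
    else pvBLoop texto rest (i + 1) corte

def extraer_descripcion_alt (texto : String) : String :=
  String.ofList (pvBLoop texto.toList texto.toList 0 (-1))

-- ===== PRECONDITION & SPEC =====
def Spec_extraer_descripcion (texto : String) (out : String) : Prop := out = extraer_descripcion_alt texto
instance (texto : String) (out : String) : Decidable (Spec_extraer_descripcion texto out) := by unfold Spec_extraer_descripcion; infer_instance

-- ===== CLAIM (what is proved, stated in full; the proofs are below) =====
def Claim_equal_extraer_descripcion : Prop := ∀ (texto : String), Dom_extraer_descripcion texto → Spec_extraer_descripcion texto (extraer_descripcion texto)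

-- ===== LEMMAS AND PROOFS =====

-- index of the last ' ' in a list, -1 if none (what B's corte is after consuming that list)
def pvLast : List Char → Int
  | [] => -1
  | c :: t => if pvLast t ≠ -1 then pvLast t + 1 else if c = ' ' then 0 else -1

-- the cut position: index of the last space strictly before the first digit
def pvCut (s : List Char) : Int := pvLast (s.takeWhile (fun c => !PySem.Chars.isdigit c))

-- closed form both programs compute
def pvG (s : List Char) : List Char :=
  if s.any PySem.Chars.isdigit = false then s
  else if pvCut s = -1 then [] else s.take (pvCut s).toNat

-- structural middle form (mirrors A's word recursion, char by char)
def pvF : List Char → List Char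
  | [] => []
  | c :: t =>
    if PySem.Chars.isdigit c then []
    else if t.any PySem.Chars.isdigit = false then c :: t
    else if (t.takeWhile (fun x => !(x == ' '))).any PySem.Chars.isdigit then []
    else c :: pvF t

lemma pvLast_ge (l : List Char) : -1 ≤ pvLast l := by
  induction l with
  | nil => simp [pvLast]
  | cons c t ih => simp only [pvLast]; split_ifs <;> omega

lemma pvLast_eq_neg_one_iff (l : List Char) : pvLast l = -1 ↔ ' ' ∉ l := by
  induction l with
  | nil => simp [pvLast]
  | cons c t ih =>
    have hge := pvLast_ge t
    simp only [pvLast, List.mem_cons, not_or, ← ih]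
    by_cases h1 : pvLast t = -1
    · by_cases h2 : c = ' ' <;> norm_num [h1, h2, eq_comm]
    · rw [if_pos h1]
      constructor
      · intro h; omega
      · intro h; exact absurd h.2 h1

lemma pvLast_append (l : List Char) (c : Char) :
    pvLast (l ++ [c]) = if c = ' ' then (l.length : Int) else pvLast l := by
  induction l with
  | nil => simp [pvLast]
  | cons a t ih =>
    have hge := pvLast_ge t
    have hge2 := pvLast_ge (t ++ [c])
    simp only [List.cons_append, pvLast, ih, List.length_cons]
    split_ifs <;> simp_all <;> omega

lemma pvTakeWhile_append (p : Char → Bool) (done rest : List Char) (c : Char)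
    (h : ∀ x ∈ done, p x = true) (hc : p c = false) :
    (done ++ c :: rest).takeWhile p = done := by
  induction done with
  | nil => simp [List.takeWhile_cons, hc]
  | cons a t ih =>
    have ha : p a = true := h a (by simp)
    simp only [List.cons_append, List.takeWhile_cons, ha, if_true]
    rw [ih (fun x hx => h x (by simp [hx]))]

-- ===== B = pvG =====
lemma pvBLoop_eq (t : List Char) : ∀ (done : List Char),
    done.any PySem.Chars.isdigit = false →
    pvBLoop (done ++ t) t done.length (pvLast done) = pvG (done ++ t) := by
  induction t with
  | nil =>
    intro done hd
    simp [pvBLoop, pvG, hd]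
  | cons c rest ih =>
    intro done hd
    by_cases hsp : c = ' '
    · subst hsp
      have h1 : done ++ ' ' :: rest = (done ++ [' ']) ++ rest := by simp
      have h2 : (done.length : Int) = pvLast (done ++ [' ']) := by simp [pvLast_append]
      have h3 : (done ++ [' ']).any PySem.Chars.isdigit = false := by
        simp [hd]; decide
      have := ih (done ++ [' ']) h3
      simp only [pvBLoop, if_pos rfl]
      rw [h2, h1]
      simpa using this
    · by_cases hdig : PySem.Chars.isdigit c
      · have hpre : (done ++ c :: rest).takeWhile (fun x => !PySem.Chars.isdigit x) = done := by
          apply pvTakeWhile_append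
          · intro x hx
            simpa using (List.any_eq_false.mp hd) x hx
          · simp [hdig]
        have hany : ¬ ((done ++ c :: rest).any PySem.Chars.isdigit = false) := by
          simp [hdig]
        have hstep : pvBLoop (done ++ c :: rest) (c :: rest) done.length (pvLast done)
            = if pvLast done ≠ -1 then PySem.Chars.slice (done ++ c :: rest) none (some (pvLast done)) else [] := by
          simp [pvBLoop, hsp, hdig]
        rw [hstep]
        unfold pvG
        rw [if_neg hany, pvCut, hpre]
        by_cases hneg : pvLast done = -1
        · simp [hneg]
        · have hge : (0:Int) ≤ pvLast done := by have := pvLast_ge done; omega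
          rw [if_pos hneg, if_neg hneg]
          rw [PySem.Chars.slice_eq_listSlice, PySem.List.slice_to _ hge]
      · have h1 : done ++ c :: rest = (done ++ [c]) ++ rest := by simp
        have h2 : pvLast done = pvLast (done ++ [c]) := by simp [pvLast_append, hsp]
        have h3 : (done ++ [c]).any PySem.Chars.isdigit = false := by
          simp [hd, hdig]
        have := ih (done ++ [c]) h3
        simp only [pvBLoop, if_neg hsp, if_neg hdig]
        rw [h2, h1]
        simpa using this

-- ===== pvF = pvG =====
-- a digit before any space means no space before any digit
lemma pvNoSpace_of_firstword (t : List Char)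
    (h : (t.takeWhile (fun x => !(x == ' '))).any PySem.Chars.isdigit = true) :
    ' ' ∉ t.takeWhile (fun c => !PySem.Chars.isdigit c) := by
  induction t with
  | nil => simp at h
  | cons c t ih =>
    by_cases hsp : c = ' '
    · subst hsp; simp [List.takeWhile_cons] at h
    · by_cases hdig : PySem.Chars.isdigit c
      · simp [List.takeWhile_cons, hdig]
      · have hdig' : PySem.Chars.isdigit c = false := by simpa using hdig
        simp only [List.takeWhile_cons] at h
        rw [if_pos (by simp [hsp])] at h
        simp only [List.any_cons, hdig', Bool.false_or] at h
        simp only [List.takeWhile_cons, hdig', Bool.not_false, if_pos, List.mem_cons, not_or]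
        exact ⟨Ne.symm hsp, ih h⟩

-- a digit somewhere but none in the first word means a space before the first digit
lemma pvSpace_mem (t : List Char)
    (h1 : t.any PySem.Chars.isdigit = true)
    (h2 : (t.takeWhile (fun x => !(x == ' '))).any PySem.Chars.isdigit = false) :
    ' ' ∈ t.takeWhile (fun c => !PySem.Chars.isdigit c) := by
  induction t with
  | nil => simp at h1
  | cons c t ih =>
    by_cases hsp : c = ' '
    · subst hsp
      have : PySem.Chars.isdigit ' ' = false := by decide
      simp [List.takeWhile_cons, this]
    · by_cases hdig : PySem.Chars.isdigit c
      · exfalso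
        simp only [List.takeWhile_cons] at h2
        rw [if_pos (by simp [hsp])] at h2
        simp [hdig] at h2
      · have hdig' : PySem.Chars.isdigit c = false := by simpa using hdig
        simp only [List.any_cons, hdig', Bool.false_or] at h1
        simp only [List.takeWhile_cons] at h2
        rw [if_pos (by simp [hsp])] at h2
        simp only [List.any_cons, hdig', Bool.false_or] at h2
        simp only [List.takeWhile_cons, hdig', Bool.not_false, if_pos, List.mem_cons]
        exact Or.inr (ih h1 h2)

lemma pvF_eq_pvG (s : List Char) : pvF s = pvG s := by
  induction s with
  | nil => simp [pvF, pvG]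
  | cons c t ih =>
    by_cases hdig : PySem.Chars.isdigit c
    · have hany : ¬ ((c :: t).any PySem.Chars.isdigit = false) := by simp [hdig]
      have hcut : pvCut (c :: t) = -1 := by
        have h : (c :: t).takeWhile (fun x => !PySem.Chars.isdigit x) = [] := by
          simp [List.takeWhile_cons, hdig]
        simp [pvCut, h, pvLast]
      simp only [pvF, pvG]
      rw [if_pos hdig, if_neg hany, if_pos hcut]
    · have hdig' : PySem.Chars.isdigit c = false := by simpa using hdig
      by_cases ht : t.any PySem.Chars.isdigit = false
      · have hany : (c :: t).any PySem.Chars.isdigit = false := by simp [hdig', ht]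
        simp only [pvF, pvG]
        rw [if_neg hdig, if_pos ht, if_pos hany]
      · simp only [Bool.not_eq_false] at ht
        have hany : ¬ ((c :: t).any PySem.Chars.isdigit = false) := by simp [ht]
        have hpre : (c :: t).takeWhile (fun x => !PySem.Chars.isdigit x)
            = c :: t.takeWhile (fun x => !PySem.Chars.isdigit x) := by
          simp [List.takeWhile_cons, hdig']
        by_cases hfw : (t.takeWhile (fun x => !(x == ' '))).any PySem.Chars.isdigit = true
        · -- first word of t has a digit: cut is -1 or 0, both give []
          have hns : ' ' ∉ t.takeWhile (fun c => !PySem.Chars.isdigit c) :=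
            pvNoSpace_of_firstword t hfw
          have hlt : pvLast (t.takeWhile (fun c => !PySem.Chars.isdigit c)) = -1 :=
            (pvLast_eq_neg_one_iff _).mpr hns
          have hcut : pvCut (c :: t) = if c = ' ' then 0 else -1 := by
            simp [pvCut, hpre, pvLast, hlt]
          simp only [pvF, pvG]
          rw [if_neg hdig, if_neg (by simp [ht]), if_pos hfw, if_neg hany]
          by_cases hsp : c = ' '
          · rw [hcut, if_pos hsp]
            simp
          · rw [hcut, if_neg hsp]
            simp
        · -- first word of t has no digit: result is c :: result for t
          have hfw' : (t.takeWhile (fun x => !(x == ' '))).any PySem.Chars.isdigit = false := by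
            simpa using hfw
          have hsm : ' ' ∈ t.takeWhile (fun c => !PySem.Chars.isdigit c) :=
            pvSpace_mem t ht hfw'
          have hlt : pvLast (t.takeWhile (fun c => !PySem.Chars.isdigit c)) ≠ -1 :=
            fun h => ((pvLast_eq_neg_one_iff _).mp h) hsm
          have hge : (0:Int) ≤ pvCut t := by
            have := pvLast_ge (t.takeWhile (fun c => !PySem.Chars.isdigit c))
            simp only [pvCut]
            omega
          have hcut : pvCut (c :: t) = pvCut t + 1 := by
            simp only [pvCut, hpre, pvLast]
            rw [if_pos hlt]
          have htn : (pvCut t + 1).toNat = (pvCut t).toNat + 1 := by omega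
          have hty : ¬ (t.any PySem.Chars.isdigit = false) := by simp [ht]
          have hcut1 : pvCut (c :: t) ≠ -1 := by omega
          have hcutt : pvCut t ≠ -1 := by omega
          simp only [pvF]
          rw [if_neg hdig, if_neg hty, if_neg (by simp [hfw']), ih]
          simp only [pvG]
          rw [if_neg hany, if_neg hcut1, if_neg hty, if_neg hcutt, hcut, htn,
            List.take_succ_cons]

-- ===== A = pvF =====
lemma pvSplitGo (c : Char) : ∀ (fuel : Nat) (l cur : List Char) (acc : List (List Char)),
    l.length ≤ fuel →
    PySem.Chars.splitOn.go [c] fuel l cur acc =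
      acc.reverse ++ List.modifyHead (fun w => cur.reverse ++ w) (List.splitOnP (fun x => x == c) l) := by
  intro fuel
  induction fuel with
  | zero =>
    intro l cur acc h
    have hl : l = [] := by cases l <;> simp_all
    subst hl
    simp [PySem.Chars.splitOn.go, List.splitOnP_nil]
  | succ fuel ih =>
    intro l cur acc h
    cases l with
    | nil => simp [PySem.Chars.splitOn.go, List.splitOnP_nil]
    | cons c' rest =>
      obtain ⟨h0, tl, e⟩ := List.exists_cons_of_ne_nil (List.splitOnP_ne_nil (fun x => x == c) rest)
      have hr : rest.length ≤ fuel := by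
        simp only [List.length_cons] at h; omega
      by_cases hc : c' = c
      · subst hc
        have hstep : PySem.Chars.splitOn.go [c'] (fuel+1) (c'::rest) cur acc
            = PySem.Chars.splitOn.go [c'] fuel (List.drop 1 (c'::rest)) [] (cur.reverse :: acc) := by
          simp [PySem.Chars.splitOn.go, List.isPrefixOf]
        rw [hstep]
        simp only [List.drop_one, List.tail_cons]
        rw [ih rest [] (cur.reverse :: acc) hr]
        rw [List.splitOnP_cons, if_pos (by simp), e]
        simp
      · have hstep : PySem.Chars.splitOn.go [c] (fuel+1) (c'::rest) cur acc
            = PySem.Chars.splitOn.go [c] fuel rest (c'::cur) acc := by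
          simp [PySem.Chars.splitOn.go, List.isPrefixOf, Ne.symm hc]
        rw [hstep, ih rest (c'::cur) acc hr]
        rw [List.splitOnP_cons, if_neg (by simp [hc]), e]
        simp

lemma pvSplitOn_eq (s : List Char) (c : Char) :
    PySem.Chars.splitOn s [c] = List.splitOnP (fun x => x == c) s := by
  obtain ⟨h0, tl, e⟩ := List.exists_cons_of_ne_nil (List.splitOnP_ne_nil (fun x => x == c) s)
  unfold PySem.Chars.splitOn
  rw [pvSplitGo c (s.length + 1) s [] [] (by omega), e]
  simp

lemma pvALoop_eq (ws : List (List Char)) : ∀ desc,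
    pvALoop ws desc = desc ++ ws.takeWhile (fun t => !(t.any PySem.Chars.isdigit)) := by
  induction ws with
  | nil => intro desc; simp [pvALoop]
  | cons t rest ih =>
    intro desc
    by_cases h : t.any PySem.Chars.isdigit = false
    · simp [pvALoop, h, ih, List.takeWhile_cons]
    · simp only [Bool.not_eq_false] at h
      simp [pvALoop, h, List.takeWhile_cons]

lemma pvSplitOnP_head (p : Char → Bool) (t : List Char) :
    ∃ tl, List.splitOnP p t = t.takeWhile (fun c => !(p c)) :: tl := by
  induction t with
  | nil => exact ⟨[], by simp [List.splitOnP_nil]⟩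
  | cons c t ih =>
    obtain ⟨tl, htl⟩ := ih
    by_cases h : p c
    · exact ⟨List.splitOnP p t, by simp [List.splitOnP_cons, h, List.takeWhile_cons]⟩
    · refine ⟨tl, ?_⟩
      rw [List.splitOnP_cons, if_neg (by simp [h]), htl, List.modifyHead_cons,
        List.takeWhile_cons, if_pos (by simp [h])]

lemma pvMem_splitOnP (p : Char → Bool) : ∀ (s : List Char) (t : List Char) (x : Char),
    t ∈ List.splitOnP p s → x ∈ t → x ∈ s := by
  intro s
  induction s with
  | nil =>
    intro t x ht hx
    simp only [List.splitOnP_nil, List.mem_singleton] at ht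
    subst ht; simp at hx
  | cons c s ih =>
    intro t x ht hx
    obtain ⟨h0, tl, e⟩ := List.exists_cons_of_ne_nil (List.splitOnP_ne_nil p s)
    by_cases h : p c
    · rw [List.splitOnP_cons, if_pos h] at ht
      rcases List.mem_cons.mp ht with rfl | ht2
      · simp at hx
      · exact List.mem_cons_of_mem _ (ih t x ht2 hx)
    · rw [List.splitOnP_cons, if_neg (by simp [h]), e, List.modifyHead_cons] at ht
      rcases List.mem_cons.mp ht with rfl | ht2
      · rcases List.mem_cons.mp hx with rfl | hx2
        · simp
        · exact List.mem_cons_of_mem _ (ih h0 x (by simp [e]) hx2)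
      · exact List.mem_cons_of_mem _ (ih t x (by rw [e]; exact List.mem_cons_of_mem _ ht2) hx)

lemma pvJoin_cons_head (sep : List Char) (c : Char) (w : List Char) (zs : List (List Char)) :
    PySem.Chars.join sep ((c :: w) :: zs) = c :: PySem.Chars.join sep (w :: zs) := by
  cases zs with
  | nil => simp [PySem.Chars.join_singleton]
  | cons b l => simp [PySem.Chars.join_cons_cons]

lemma pvA_eq_pvF (s : List Char) :
    PySem.Chars.join [' ']
      ((List.splitOnP (fun x => x == ' ') s).takeWhile (fun t => !(t.any PySem.Chars.isdigit)))
      = pvF s := by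
  induction s with
  | nil =>
    simp [List.splitOnP_nil, List.takeWhile_cons, pvF, PySem.Chars.join_singleton]
  | cons c t ih =>
    obtain ⟨tl, htl⟩ := pvSplitOnP_head (fun x => x == ' ') t
    by_cases hdig : PySem.Chars.isdigit c
    · have hsp : c ≠ ' ' := by intro e; subst e; exact absurd hdig (by decide)
      rw [List.splitOnP_cons, if_neg (by simp [hsp]), htl, List.modifyHead_cons,
        List.takeWhile_cons, if_neg (by simp [hdig]), PySem.Chars.join_nil]
      simp only [pvF]
      rw [if_pos hdig]
    · have hdig' : PySem.Chars.isdigit c = false := by simpa using hdig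
      by_cases ht : t.any PySem.Chars.isdigit = false
      · have hall : ∀ u ∈ List.splitOnP (fun x => x == ' ') (c :: t),
            (!(u.any PySem.Chars.isdigit)) = true := by
          intro u hu
          simp only [Bool.not_eq_true', List.any_eq_false]
          intro x hx
          have hxs : x ∈ c :: t := pvMem_splitOnP _ (c :: t) u x hu hx
          rcases List.mem_cons.mp hxs with rfl | hxm
          · exact hdig
          · exact (List.any_eq_false.mp ht) x hxm
        rw [List.takeWhile_eq_self_iff.mpr hall]
        have hj : PySem.Chars.join [' '] (List.splitOnP (fun x => x == ' ') (c :: t)) = c :: t := by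
          have h := List.intercalate_splitOn (c :: t) ' '
          simpa [PySem.Chars.join, List.splitOn] using h
        rw [hj]
        simp only [pvF]
        rw [if_neg hdig, if_pos ht]
      · simp only [Bool.not_eq_false] at ht
        have hty : ¬ (t.any PySem.Chars.isdigit = false) := by simp [ht]
        by_cases hfw : (t.takeWhile (fun x => !(x == ' '))).any PySem.Chars.isdigit = true
        · have hempty : (List.splitOnP (fun x => x == ' ') t).takeWhile
              (fun u => !(u.any PySem.Chars.isdigit)) = [] := by
            rw [htl, List.takeWhile_cons, if_neg (by simp [hfw])]
          by_cases hsp : c = ' '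
          · subst hsp
            rw [List.splitOnP_cons, if_pos (by simp), List.takeWhile_cons, if_pos (by simp),
              hempty, PySem.Chars.join_singleton]
            simp only [pvF]
            rw [if_neg hdig, if_neg hty, if_pos hfw]
          · rw [List.splitOnP_cons, if_neg (by simp [hsp]), htl, List.modifyHead_cons,
              List.takeWhile_cons, if_neg (by simp [hfw]), PySem.Chars.join_nil]
            simp only [pvF]
            rw [if_neg hdig, if_neg hty, if_pos hfw]
        · have hfw' : (t.takeWhile (fun x => !(x == ' '))).any PySem.Chars.isdigit = false := by
            simpa using hfw
          have hstep : (List.splitOnP (fun x => x == ' ') t).takeWhile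
              (fun u => !(u.any PySem.Chars.isdigit))
              = (t.takeWhile (fun x => !(x == ' ')))
                :: tl.takeWhile (fun u => !(u.any PySem.Chars.isdigit)) := by
            rw [htl, List.takeWhile_cons, if_pos (by simp [hfw'])]
          by_cases hsp : c = ' '
          · subst hsp
            rw [List.splitOnP_cons, if_pos (by simp), List.takeWhile_cons, if_pos (by simp),
              hstep, PySem.Chars.join_cons_cons, ← hstep, ih]
            simp only [pvF]
            rw [if_neg hdig, if_neg hty, if_neg (by simp [hfw'])]
            simp
          · rw [List.splitOnP_cons, if_neg (by simp [hsp]), htl, List.modifyHead_cons,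
              List.takeWhile_cons, if_pos (by simp [hdig', hfw']), pvJoin_cons_head,
              ← hstep, ih]
            simp only [pvF]
            rw [if_neg hdig, if_neg hty, if_neg (by simp [hfw'])]

-- ===== VERDICT (by name: the statement is the Claim_ definition above) =====
theorem extraer_descripcion_spec : Claim_equal_extraer_descripcion := by
  intro texto _
  unfold Spec_extraer_descripcion extraer_descripcion extraer_descripcion_alt
  show String.ofList (PySem.Chars.join [' ']
      (pvALoop (PySem.Chars.splitOn texto.toList [' ']) [])) = _
  congr 1
  rw [pvSplitOn_eq, pvALoop_eq, List.nil_append, pvA_eq_pvF, pvF_eq_pvG]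
  have h := pvBLoop_eq texto.toList [] (by simp)
  simpa [pvLast] using h.symm
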